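-- pv_equiv track=rewrite | github.com/linshibo1994/happy8 | src/happy8_app.py | create_number_display
-- ===== SOURCE A (Python) =====
-- from typing import List, Dict, Any
--
-- def create_number_display(numbers: List[int], number_type: str = "predicted", color_class: str = None) -> str:
--     """创建号码显示HTML"""
--     html = ""
--     if color_class:
--         css_class = f"{color_class} prediction-number"
--     else:
--         css_class = f"{number_type}-number prediction-number"
--
--     for i, num in enumerate(numbers):
--         if i > 0 and i % 10 == 0:
--             html += "<br>"
--         html += f'<span class="{css_class}">{num:02d}</span>'
--
--     return html
-- ===== SOURCE B (Python) =====
-- def create_number_display(numbers, number_type="predicted", color_class=None):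
--     """创建号码显示HTML"""
--     if color_class:
--         css_class = f"{color_class} prediction-number"
--     else:
--         css_class = f"{number_type}-number prediction-number"
--     chunks = [numbers[i:i + 10] for i in range(0, len(numbers), 10)]
--     return "<br>".join(
--         "".join(f'<span class="{css_class}">{num:02d}</span>' for num in chunk)
--         for chunk in chunks
--     )
-- ===== Notes on version B (the rewrite author's own statement) =====
-- stated objective: idiomatic
-- what changed: Replaces the per-element enumerate loop with its i%10 counter-branch and string += by slicing the list into chunks of 10 and joining per-chunk span strings with '<br>'.
import Mathlib
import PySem

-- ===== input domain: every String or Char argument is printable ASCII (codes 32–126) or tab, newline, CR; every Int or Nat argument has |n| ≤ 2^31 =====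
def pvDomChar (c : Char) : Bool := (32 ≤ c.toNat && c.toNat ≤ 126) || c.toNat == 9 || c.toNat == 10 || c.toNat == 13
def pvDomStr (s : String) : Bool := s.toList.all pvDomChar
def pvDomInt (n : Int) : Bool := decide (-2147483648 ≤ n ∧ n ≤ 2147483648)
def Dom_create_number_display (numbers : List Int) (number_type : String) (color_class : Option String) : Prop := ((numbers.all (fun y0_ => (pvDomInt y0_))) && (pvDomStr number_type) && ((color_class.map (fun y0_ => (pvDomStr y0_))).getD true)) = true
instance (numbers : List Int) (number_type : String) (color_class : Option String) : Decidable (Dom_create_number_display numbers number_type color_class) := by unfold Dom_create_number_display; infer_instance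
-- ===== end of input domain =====

-- B builds the same HTML by slicing the numbers into chunks of 10 and joining per-chunk
-- span strings with "<br>", instead of A's per-element i%10 counter-branch with += (idiomatic).


-- ===== PORT A =====
-- shared by both ports: Python's f'{num:02d}' (sign-aware zero padding to width 2)
def pvFmt02 (n : Int) : String :=
  if 0 ≤ n ∧ n < 10 then "0" ++ PySem.Int.toStr n else PySem.Int.toStr n

-- shared by both ports: the f-string f'<span class="{css}">{num:02d}</span>'
def pvSpan (css : String) (n : Int) : String :=
  "<span class=\"" ++ css ++ "\">" ++ pvFmt02 n ++ "</span>"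

-- the if color_class / else choice of css_class (textually identical in A and in Source B)
def pvCss (number_type : String) (color_class : Option String) : String :=
  match color_class with
  | some c => if c = "" then number_type ++ "-number prediction-number"
              else c ++ " prediction-number"
  | none => number_type ++ "-number prediction-number"

def create_number_display (numbers : List Int) (number_type : String) (color_class : Option String) : String :=
  let css_class := pvCss number_type color_class
  (PySem.List.enumerate numbers).foldl
    (fun html p =>
      (if p.1 > 0 ∧ p.1 % 10 = 0 then html ++ "<br>" else html) ++ pvSpan css_class p.2)
    ""

-- ===== PORT B =====
def create_number_display_alt (numbers : List Int) (number_type : String) (color_class : Option String) : String :=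
  let css_class := pvCss number_type color_class
  let chunks := (PySem.List.pyRange 0 (numbers.length : Int) 10).map
    (fun i => PySem.List.slice numbers (some i) (some (i + 10)))
  PySem.Str.join "<br>"
    (chunks.map (fun chunk => PySem.Str.join "" (chunk.map (fun num => pvSpan css_class num))))

-- ===== PRECONDITION & SPEC =====
def Spec_create_number_display (numbers : List Int) (number_type : String) (color_class : Option String) (out : String) : Prop := out = create_number_display_alt numbers number_type color_class
instance (numbers : List Int) (number_type : String) (color_class : Option String) (out : String) : Decidable (Spec_create_number_display numbers number_type color_class out) := by unfold Spec_create_number_display; infer_instance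

-- ===== CLAIM (what is proved, stated in full; the proofs are below) =====
def Claim_equal_create_number_display : Prop := ∀ (numbers : List Int) (number_type : String) (color_class : Option String), Dom_create_number_display numbers number_type color_class → Spec_create_number_display numbers number_type color_class (create_number_display numbers number_type color_class)

-- ===== LEMMAS AND PROOFS =====

-- A's loop, written as structural recursion on the list with the running index
def aLoop (css : String) (i : Int) : List Int → String
  | [] => ""
  | x :: r =>
      (if i > 0 ∧ i % 10 = 0 then "<br>" else "") ++ pvSpan css x ++ aLoop css (i + 1) r

-- "".join of the spans of a chunk
def joinSpans (css : String) (ys : List Int) : String :=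
  PySem.Str.join "" (ys.map (fun num => pvSpan css num))

theorem ofList_br (L : List Char) :
    String.ofList ('<'::'b'::'r'::'>'::L) = "<br>" ++ String.ofList L := by
  rw [show ('<'::'b'::'r'::'>'::L) = ['<','b','r','>'] ++ L from rfl, String.ofList_append]

theorem joinSpans_nil (css : String) : joinSpans css [] = "" := by
  simp [joinSpans, PySem.Str.join, PySem.Chars.join, List.intercalate]

theorem joinSpans_cons (css : String) (x : Int) (ys : List Int) :
    joinSpans css (x :: ys) = pvSpan css x ++ joinSpans css ys := by
  cases ys with
  | nil => simp [joinSpans, PySem.Str.join, PySem.Chars.join, List.intercalate]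
  | cons y l =>
      simp [joinSpans, PySem.Str.join, PySem.Chars.join_cons_cons]

theorem join_br_cons (c : String) (rest : List String) (h : rest ≠ []) :
    PySem.Str.join "<br>" (c :: rest) = c ++ "<br>" ++ PySem.Str.join "<br>" rest := by
  cases rest with
  | nil => exact absurd rfl h
  | cons r l =>
      simp only [PySem.Str.join, List.map_cons, PySem.Chars.join_cons_cons]
      rw [show ("<br>" : String).toList = ['<','b','r','>'] from rfl]
      have hre : c.toList ++ ['<','b','r','>'] ++
            PySem.Chars.join ['<','b','r','>'] (r.toList :: l.map String.toList)
          = c.toList ++ ('<'::'b'::'r'::'>'::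
            PySem.Chars.join ['<','b','r','>'] (r.toList :: l.map String.toList)) := by simp
      rw [hre, String.ofList_append, ofList_br]
      simp [String.append_assoc]

theorem foldA (css : String) (xs : List Int) : ∀ (i : Int) (init : String),
    (PySem.List.enumerate xs i).foldl
      (fun html p =>
        (if p.1 > 0 ∧ p.1 % 10 = 0 then html ++ "<br>" else html) ++ pvSpan css p.2)
      init = init ++ aLoop css i xs := by
  induction xs with
  | nil => intro i init; simp [PySem.List.enumerate_nil, aLoop]
  | cons x r ih =>
      intro i init
      rw [PySem.List.enumerate_cons, List.foldl_cons, ih]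
      simp only [aLoop]
      split_ifs <;> simp [String.append_assoc]

theorem aLoop_shift (css : String) (xs : List Int) : ∀ (i : Int), 0 < i →
    aLoop css i xs = aLoop css (i + 10) xs := by
  induction xs with
  | nil => intro i _; rfl
  | cons x r ih =>
      intro i hi
      simp only [aLoop]
      have hpos : (i + 10 > 0 ∧ (i + 10) % 10 = 0) ↔ (i > 0 ∧ i % 10 = 0) := by
        constructor <;> intro h <;> exact ⟨by omega, by omega⟩
      rw [show i + 10 + 1 = i + 1 + 10 from by ring, ← ih (i + 1) (by omega)]
      by_cases hc : i > 0 ∧ i % 10 = 0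
      · rw [if_pos hc, if_pos (hpos.mpr hc)]
      · rw [if_neg hc, if_neg (fun h => hc (hpos.mp h))]

-- first (up to) 10 - j elements of A's loop produce plain spans, then the index reaches 10
theorem aLoop_front (css : String) (xs : List Int) : ∀ (j : Nat), j < 10 →
    aLoop css (j : Int) xs
      = joinSpans css (xs.take (10 - j)) ++ aLoop css 10 (xs.drop (10 - j)) := by
  induction xs with
  | nil =>
      intro j hj
      simp [aLoop, joinSpans_nil]
  | cons x r ih =>
      intro j hj
      have hsep : ¬ ((j : Int) > 0 ∧ (j : Int) % 10 = 0) := by omega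
      have h1 : 10 - j = (10 - j - 1) + 1 := by omega
      have htake : (x :: r).take (10 - j) = x :: r.take (10 - j - 1) := by
        rw [h1, List.take_succ_cons]
        simp
      have hdrop : (x :: r).drop (10 - j) = r.drop (10 - j - 1) := by
        rw [h1, List.drop_succ_cons]
        simp
      rw [htake, hdrop, joinSpans_cons]
      simp only [aLoop, if_neg hsep]
      by_cases h9 : j = 9
      · subst h9
        norm_num
        simp [joinSpans_nil]
      · rw [show ((j : Int) + 1) = ((j + 1 : Nat) : Int) from by push_cast; ring,
          ih (j + 1) (by omega), show 10 - (j + 1) = 10 - j - 1 from by omega]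
        simp [String.append_assoc]

-- B's body minus the css computation
def bBody (css : String) (xs : List Int) : String :=
  PySem.Str.join "<br>"
    (((PySem.List.pyRange 0 (xs.length : Int) 10).map
        (fun i => PySem.List.slice xs (some i) (some (i + 10)))).map
      (fun chunk => PySem.Str.join "" (chunk.map (fun num => pvSpan css num))))

theorem bBody_eq_range (css : String) (xs : List Int) :
    bBody css xs
      = PySem.Str.join "<br>"
          ((List.range (((xs.length : Int) + 9) / 10).toNat).map
            (fun k => joinSpans css ((xs.drop (10 * k)).take 10))) := by
  unfold bBody
  rw [PySem.List.pyRange_of_pos 0 (xs.length : Int) (by norm_num)]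
  rw [show ((xs.length : Int) - 0 + 10 - 1) = (xs.length : Int) + 9 from by ring]
  by_cases h : (0 : Int) < (xs.length : Int)
  · rw [if_pos h, List.map_map, List.map_map]
    congr 1
    apply List.map_congr_left
    intro k _
    simp only [Function.comp_apply]
    rw [show ((0 : Int) + 10 * (k : Int)) = ((10 * k : Nat) : Int) from by push_cast; ring]
    rw [show ((10 * k : Nat) : Int) + 10 = ((10 * k : Nat) : Int) + ((10 : Nat) : Int) from by
      norm_num]
    rw [PySem.List.slice_natCast_add]
    rfl
  · rw [if_neg h]
    have hx : xs = [] := by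
      cases xs with
      | nil => rfl
      | cons a l => exfalso; apply h; simp only [List.length_cons]; omega
    subst hx
    simp [PySem.Str.join, PySem.Chars.join, List.intercalate]

-- chunk recursion for the B side, and the main equivalence of the two loop shapes
theorem main_eq (css : String) : ∀ (n : Nat) (xs : List Int), xs.length ≤ n →
    aLoop css 0 xs = bBody css xs := by
  intro n
  induction n with
  | zero =>
      intro xs h
      have hx : xs = [] := List.eq_nil_of_length_eq_zero (by omega)
      subst hx
      rw [bBody_eq_range]
      norm_num [aLoop, PySem.Str.join, PySem.Chars.join, List.intercalate]
  | succ n ih =>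
      intro xs hlen
      cases xs with
      | nil =>
          rw [bBody_eq_range]
          norm_num [aLoop, PySem.Str.join, PySem.Chars.join, List.intercalate]
      | cons a l =>
          have key : ∀ xs : List Int, xs.length ≤ n + 1 → 0 < xs.length →
              aLoop css 0 xs = bBody css xs := by
            intro xs hlen hpos
            -- A side: first chunk then the rest at index 10
            have hA : aLoop css 0 xs = joinSpans css (xs.take 10) ++ aLoop css 10 (xs.drop 10) := by
              have := aLoop_front css xs 0 (by omega)
              simpa using this
            -- number of chunks
            set m : Nat := (((xs.length : Int) + 9) / 10).toNat with hm
            have hm1 : 1 ≤ m := by omega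
            rw [bBody_eq_range, ← hm]
            have hrange : List.range m = 0 :: (List.range (m - 1)).map (· + 1) := by
              rw [show m = (m - 1) + 1 from by omega, List.range_succ_eq_map]
              simp
            rw [hrange]
            by_cases hsmall : xs.length ≤ 10
            · -- single chunk: the loop never reaches index 10 with elements left
              have hmone : m - 1 = 0 := by omega
              have hdropl : (xs.drop 10).length = 0 := by simp [List.length_drop]; omega
              have hdrop : xs.drop 10 = [] := List.eq_nil_of_length_eq_zero hdropl
              rw [hmone]
              simp only [List.range_zero, List.map_nil, List.map_cons]
              rw [hA, hdrop]
              simp only [aLoop, Nat.mul_zero, List.drop_zero]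
              rw [show PySem.Str.join "<br>" [joinSpans css (xs.take 10)]
                  = joinSpans css (xs.take 10) from by
                simp [PySem.Str.join, PySem.Chars.join, List.intercalate, joinSpans]]
              simp
            · -- at least two chunks
              have hdl : (xs.drop 10).length = xs.length - 10 := by simp
              have hdropne : xs.drop 10 ≠ [] := by
                intro hcon
                rw [hcon] at hdl
                simp at hdl
                omega
              have ihtail : aLoop css 0 (xs.drop 10) = bBody css (xs.drop 10) := by
                apply ih
                omega
              have h10shift : aLoop css 10 (xs.drop 10) = "<br>" ++ aLoop css 0 (xs.drop 10) := by
                cases hdp : xs.drop 10 with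
                | nil => exact absurd hdp hdropne
                | cons y ys =>
                    simp only [aLoop]
                    rw [if_pos (by norm_num : (10 : Int) > 0 ∧ (10 : Int) % 10 = 0),
                      if_neg (by norm_num : ¬ ((0 : Int) > 0 ∧ (0 : Int) % 10 = 0))]
                    rw [show (10 : Int) + 1 = 1 + 10 from by ring,
                      ← aLoop_shift css ys 1 (by norm_num)]
                    rw [show (0 : Int) + 1 = 1 from by ring]
                    simp [String.append_assoc]
              have htailchunks :
                  ((List.range (m - 1)).map (· + 1)).map
                      (fun k => joinSpans css ((xs.drop (10 * k)).take 10))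
                    = (List.range (m - 1)).map
                        (fun k => joinSpans css (((xs.drop 10).drop (10 * k)).take 10)) := by
                rw [List.map_map]
                apply List.map_congr_left
                intro k _
                simp only [Function.comp_apply]
                rw [List.drop_drop]
                rw [show 10 * (k + 1) = 10 + 10 * k from by ring]
              rw [List.map_cons, htailchunks]
              have hrestne : (List.range (m - 1)).map
                  (fun k => joinSpans css (((xs.drop 10).drop (10 * k)).take 10)) ≠ [] := by
                simp only [ne_eq, List.map_eq_nil_iff, List.range_eq_nil]
                omega
              rw [join_br_cons _ _ hrestne]
              rw [hA, h10shift, ihtail, bBody_eq_range]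
              have hmeq : ((((xs.drop 10).length : Int) + 9) / 10).toNat = m - 1 := by
                have hc : ((xs.length - 10 : Nat) : Int) = (xs.length : Int) - 10 := by omega
                rw [hdl, hc]
                omega
              rw [hmeq]
              simp only [Nat.mul_zero, List.drop_zero]
              rw [String.append_assoc]
          exact key (a :: l) hlen (by simp)

-- ===== VERDICT (by name: the statement is the Claim_ definition above) =====
theorem create_number_display_spec : Claim_equal_create_number_display := by
  intro numbers number_type color_class _
  unfold Spec_create_number_display create_number_display create_number_display_alt
  rw [foldA, main_eq (pvCss number_type color_class) numbers.length numbers le_rfl]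
  rw [show ("" ++ bBody (pvCss number_type color_class) numbers)
      = bBody (pvCss number_type color_class) numbers from by simp]
  rfl
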